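-- pv_equiv track=rewrite | github.com/d-virusss/Algorithm_python | algorithm/LINE 2020 상반기/2.py | solution
-- ===== SOURCE A (Python) =====
-- def solution(answer_sheet, sheets):
--   result = 0
--   for i in range(len(sheets)-1):
--     for j in range(i+1,len(sheets)):
--       wrong_count = 0
--       sequence_count = 0
--       longest_sequence = 0
--       for q in range(len(answer_sheet)):
--         if (sheets[i][q] == sheets[j][q]) and (sheets[i][q]!=answer_sheet[q]):
--           wrong_count += 1
--           sequence_count += 1
--         else:
--           if sequence_count > longest_sequence: longest_sequence = sequence_count
--           sequence_count = 0
--       if sequence_count > longest_sequence: longest_sequence = sequence_count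
--       if wrong_count+(longest_sequence**2) > result:
--         result = wrong_count+(longest_sequence**2)
--
--   return result
-- ===== SOURCE B (Python) =====
-- def _lead(bs):
--     # length of the leading run of True values
--     k = 0
--     for x in bs:
--         if not x:
--             break
--         k += 1
--     return k
--
--
-- def _longest_run(bs):
--     # longest run of True values, found by jumping from run to run
--     best = 0
--     while bs:
--         k = _lead(bs)
--         if k > best:
--             best = k
--         bs = bs[k + 1:]
--     return best
--
--
-- def solution(answer_sheet, sheets):
--     best = 0
--     for i, a in enumerate(sheets):
--         for b in sheets[i + 1:]:
--             shared = [x == y and x != z for x, y, z in zip(a, b, answer_sheet)]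
--             wrong = sum(shared)
--             longest = _longest_run(shared)
--             best = max(best, wrong + longest ** 2)
--     return best
-- ===== Notes on version B (the rewrite author's own statement) =====
-- stated objective: simpler
-- what changed: A fuses everything into one triple-counter positional scan per sheet pair; B instead builds the shared-wrong Bool list by zipping the three lists, takes its sum for the wrong count, and finds the longest run by a run-jumping scan (skip to the end of each leading run), iterating pairs via enumerate/slicing instead of index ranges.
import Mathlib
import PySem

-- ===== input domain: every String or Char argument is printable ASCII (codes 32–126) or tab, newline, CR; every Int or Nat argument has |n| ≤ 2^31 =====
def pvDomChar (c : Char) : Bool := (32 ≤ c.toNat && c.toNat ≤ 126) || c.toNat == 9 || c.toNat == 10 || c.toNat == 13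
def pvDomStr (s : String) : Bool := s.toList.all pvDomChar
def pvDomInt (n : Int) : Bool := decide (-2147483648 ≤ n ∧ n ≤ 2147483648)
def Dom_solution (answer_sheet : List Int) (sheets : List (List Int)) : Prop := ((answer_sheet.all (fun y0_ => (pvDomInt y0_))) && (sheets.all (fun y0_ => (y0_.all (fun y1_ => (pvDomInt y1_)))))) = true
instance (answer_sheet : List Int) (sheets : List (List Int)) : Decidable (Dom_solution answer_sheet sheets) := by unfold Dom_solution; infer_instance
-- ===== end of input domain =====

-- B replaces A's fused three-counter scan by a per-pair decomposition: a shared-wrong Bool list,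
-- its sum, and a run-jumping longest-run search (objective: simpler; same asymptotic cost).

-- ===== PORT A =====
def solution (answer_sheet : List Int) (sheets : List (List Int)) : Int :=
  (PySem.List.pyRange 0 ((sheets.length : Int) - 1) 1).foldl (fun result i =>
    (PySem.List.pyRange (i + 1) (sheets.length : Int) 1).foldl (fun result j =>
      let t : Int × Int × Int :=
        (PySem.List.pyRange 0 (answer_sheet.length : Int) 1).foldl (fun (st : Int × Int × Int) q =>
          let si := PySem.List.pyGetD (PySem.List.pyGetD sheets i []) q 0
          let sj := PySem.List.pyGetD (PySem.List.pyGetD sheets j []) q 0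
          let aq := PySem.List.pyGetD answer_sheet q 0
          if si == sj && !(si == aq) then (st.1 + 1, st.2.1 + 1, st.2.2)
          else (st.1, 0, if st.2.1 > st.2.2 then st.2.1 else st.2.2)) (0, 0, 0)
      let longest := if t.2.1 > t.2.2 then t.2.1 else t.2.2
      if t.1 + longest ^ 2 > result then t.1 + longest ^ 2 else result) result) 0

-- ===== PORT B =====
-- length of the leading run of `true` (Source B's `_lead` for-with-break loop)
def leadRun : List Bool → Nat
  | [] => 0
  | x :: t => if x then leadRun t + 1 else 0

-- Source B's `_longest_run` while loop: jump run by run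
def longestRun (bs : List Bool) (best : Nat) : Nat :=
  match h : bs with
  | [] => best
  | _ :: _ =>
      let k := leadRun bs
      longestRun (bs.drop (k + 1)) (if k > best then k else best)
  termination_by bs.length
  decreasing_by subst h; simp [List.length_drop]

def solution_alt (answer_sheet : List Int) (sheets : List (List Int)) : Int :=
  (PySem.List.enumerate sheets 0).foldl (fun best p =>
    (PySem.List.slice sheets (some (p.1 + 1)) none).foldl (fun best b =>
      let shared := (p.2.zip (b.zip answer_sheet)).map
        (fun t => t.1 == t.2.1 && !(t.1 == t.2.2))
      let wrong := (shared.map (fun x => if x then (1 : Int) else 0)).sum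
      let longest : Int := (longestRun shared 0 : Nat)
      max best (wrong + longest ^ 2)) best) 0

-- ===== PRECONDITION & SPEC =====
-- A raises IndexError when there are ≥ 2 sheets and some sheet is shorter than the answer key;
-- Pre_ excludes exactly those inputs (everywhere else A returns normally).
def Pre_solution (answer_sheet : List Int) (sheets : List (List Int)) : Prop :=
  2 ≤ sheets.length → ∀ s ∈ sheets, answer_sheet.length ≤ s.length
instance (answer_sheet : List Int) (sheets : List (List Int)) : Decidable (Pre_solution answer_sheet sheets) := by unfold Pre_solution; infer_instance

def pvWitness_solution : List Int × List (List Int) :=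
  ([1, 2, 3], [[1, 2, 4], [1, 3, 4], [1, 2, 3]])

def Spec_solution (answer_sheet : List Int) (sheets : List (List Int)) (out : Int) : Prop := out = solution_alt answer_sheet sheets
instance (answer_sheet : List Int) (sheets : List (List Int)) (out : Int) : Decidable (Spec_solution answer_sheet sheets out) := by unfold Spec_solution; infer_instance

-- ===== CLAIM (what is proved, stated in full; the proofs are below) =====
def Claim_equal_solution : Prop := ∀ (answer_sheet : List Int) (sheets : List (List Int)), Dom_solution answer_sheet sheets → Pre_solution answer_sheet sheets → Spec_solution answer_sheet sheets (solution answer_sheet sheets)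

-- ===== LEMMAS AND PROOFS =====

-- A's inner-loop step on the shared-wrong Bool value
def stepA (st : Int × Int × Int) (b : Bool) : Int × Int × Int :=
  if b then (st.1 + 1, st.2.1 + 1, st.2.2)
  else (st.1, 0, if st.2.1 > st.2.2 then st.2.1 else st.2.2)

-- current-run length after scanning bs with pending run s
def gs (s : Nat) : List Bool → Nat
  | [] => s
  | b :: t => gs (if b then s + 1 else 0) t

-- A's longest-so-far after scanning bs with pending run s and best-so-far l
def gl (s l : Nat) : List Bool → Nat
  | [] => l
  | b :: t => if b then gl (s + 1) l t else gl 0 (max l s) t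

-- longest run of true in bs, counting a pending prefix run of length s
def mrp (s : Nat) : List Bool → Nat
  | [] => s
  | b :: t => if b then mrp (s + 1) t else max s (mrp 0 t)

-- A's per-pair inner computation, extracted
def innerA (ans a b : List Int) : Int :=
  let t : Int × Int × Int :=
    (PySem.List.pyRange 0 (ans.length : Int) 1).foldl (fun (st : Int × Int × Int) q =>
      let si := PySem.List.pyGetD a q 0
      let sj := PySem.List.pyGetD b q 0
      let aq := PySem.List.pyGetD ans q 0
      if si == sj && !(si == aq) then (st.1 + 1, st.2.1 + 1, st.2.2)
      else (st.1, 0, if st.2.1 > st.2.2 then st.2.1 else st.2.2)) (0, 0, 0)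
  let longest := if t.2.1 > t.2.2 then t.2.1 else t.2.2
  t.1 + longest ^ 2

-- B's per-pair score, extracted
def pairVal (ans a b : List Int) : Int :=
  let shared := (a.zip (b.zip ans)).map (fun t => t.1 == t.2.1 && !(t.1 == t.2.2))
  let wrong := (shared.map (fun x => if x then (1 : Int) else 0)).sum
  let longest : Int := (longestRun shared 0 : Nat)
  wrong + longest ^ 2

theorem foldl_stepA (bs : List Bool) : ∀ (w : Int) (s l : Nat),
    bs.foldl stepA (w, (s : Int), (l : Int))
      = (w + (bs.countP (fun b => b) : Int), ((gs s bs : Nat) : Int), ((gl s l bs : Nat) : Int)) := by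
  induction bs with
  | nil => intro w s l; simp [gs, gl]
  | cons b t ih =>
    intro w s l
    cases b with
    | true =>
      have hst : stepA (w, (s : Int), (l : Int)) true = (w + 1, ((s + 1 : Nat) : Int), (l : Int)) := by
        simp [stepA]
      rw [List.foldl_cons, hst, ih (w + 1) (s + 1) l]
      simp [gs, gl, List.countP_cons, Prod.ext_iff]
      all_goals push_cast
      all_goals omega
    | false =>
      have hst : stepA (w, (s : Int), (l : Int)) false
          = (w, ((0 : Nat) : Int), ((max l s : Nat) : Int)) := by
        have h0 : stepA (w, (s : Int), (l : Int)) false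
            = (w, 0, if (s : Int) > (l : Int) then (s : Int) else (l : Int)) := rfl
        rw [h0]
        simp [Prod.ext_iff]
        all_goals split_ifs <;> push_cast <;> omega
      rw [List.foldl_cons, hst, ih w 0 (max l s)]
      simp [gs, gl, List.countP_cons, Prod.ext_iff]
      all_goals push_cast
      all_goals omega

theorem max_gl_gs (bs : List Bool) : ∀ (s l : Nat), max (gl s l bs) (gs s bs) = max l (mrp s bs) := by
  induction bs with
  | nil => intro s l; simp [gs, gl, mrp]
  | cons b t ih =>
    intro s l
    cases b with
    | true =>
      simp only [gs, gl, mrp, if_pos]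
      exact ih (s + 1) l
    | false =>
      simp only [gs, gl, mrp, Bool.false_eq_true, if_neg, not_false_iff, ite_false]
      rw [ih 0 (max l s)]
      omega

theorem mrp_lead (bs : List Bool) : ∀ (s : Nat),
    mrp s bs = max (s + leadRun bs) (mrp 0 (bs.drop (leadRun bs + 1))) := by
  induction bs with
  | nil => intro s; simp [mrp, leadRun]
  | cons b t ih =>
    intro s
    cases b with
    | true =>
      simp only [mrp, leadRun, if_pos]
      rw [ih (s + 1)]
      have : (true :: t).drop (leadRun t + 1 + 1) = t.drop (leadRun t + 1) := by
        simp [List.drop_succ_cons]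
      rw [this]
      omega
    | false =>
      simp only [mrp, leadRun, Bool.false_eq_true, if_neg, not_false_iff, ite_false]
      simp [List.drop_succ_cons]

theorem longestRun_eq (bs : List Bool) : ∀ (best : Nat), longestRun bs best = max best (mrp 0 bs) := by
  induction hn : bs.length using Nat.strong_induction_on generalizing bs with
  | _ n ih =>
    intro best
    match bs with
    | [] => simp [longestRun, mrp]
    | x :: t =>
      rw [longestRun]
      have hlt : ((x :: t).drop (leadRun (x :: t) + 1)).length < n := by
        subst hn; simp [List.length_drop]
      rw [ih _ hlt _ rfl]
      have hif : (if leadRun (x :: t) > best then leadRun (x :: t) else best)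
          = max best (leadRun (x :: t)) := by split_ifs <;> omega
      rw [hif]
      have hm := mrp_lead (x :: t) 0
      omega

-- the positionally computed shared-wrong list (A) equals the zip form (B)
theorem shared_eq (ans a b : List Int) (ha : ans.length ≤ a.length) (hb : ans.length ≤ b.length) :
    (List.range ans.length).map (fun k =>
        PySem.List.pyGetD a ((k : Nat) : Int) 0 == PySem.List.pyGetD b ((k : Nat) : Int) 0 &&
        !(PySem.List.pyGetD a ((k : Nat) : Int) 0 == PySem.List.pyGetD ans ((k : Nat) : Int) 0))
      = (a.zip (b.zip ans)).map (fun t => t.1 == t.2.1 && !(t.1 == t.2.2)) := by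
  apply List.ext_getElem
  · simp; omega
  · intro k h1 h2
    have hk : k < ans.length := by simpa using h1
    have hka : k < a.length := lt_of_lt_of_le hk ha
    have hkb : k < b.length := lt_of_lt_of_le hk hb
    simp only [List.getElem_map, List.getElem_range, List.getElem_zip,
      PySem.List.pyGetD_natCast]
    rw [List.getD_eq_getElem a 0 hka, List.getD_eq_getElem b 0 hkb, List.getD_eq_getElem ans 0 hk]

theorem foldl_range_stepA (f : Nat → Bool) (n : Nat) (init : Int × Int × Int) :
    (List.range n).foldl (fun st k =>
        if f k then (st.1 + 1, st.2.1 + 1, st.2.2)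
        else (st.1, 0, if st.2.1 > st.2.2 then st.2.1 else st.2.2)) init
      = List.foldl stepA init ((List.range n).map f) := by
  rw [List.foldl_map]
  rfl

-- A's inner q-loop value equals B's per-pair score
theorem inner_eq (ans a b : List Int) (ha : ans.length ≤ a.length) (hb : ans.length ≤ b.length) :
    innerA ans a b = pairVal ans a b := by
  unfold innerA pairVal
  have hrange : PySem.List.pyRange 0 (ans.length : Int) 1
      = (List.range ans.length).map (fun k => ((k : Nat) : Int)) := by
    rw [PySem.List.pyRange_one]
    simp
  rw [hrange, List.foldl_map]
  have hb1 : (List.range ans.length).foldl (fun (st : Int × Int × Int) (k : Nat) =>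
      let si := PySem.List.pyGetD a ((k : Nat) : Int) 0
      let sj := PySem.List.pyGetD b ((k : Nat) : Int) 0
      let aq := PySem.List.pyGetD ans ((k : Nat) : Int) 0
      if si == sj && !(si == aq) then (st.1 + 1, st.2.1 + 1, st.2.2)
      else (st.1, 0, if st.2.1 > st.2.2 then st.2.1 else st.2.2)) (0, 0, 0)
      = List.foldl stepA (0, 0, 0) ((List.range ans.length).map (fun k =>
          PySem.List.pyGetD a ((k : Nat) : Int) 0 == PySem.List.pyGetD b ((k : Nat) : Int) 0 &&
          !(PySem.List.pyGetD a ((k : Nat) : Int) 0 == PySem.List.pyGetD ans ((k : Nat) : Int) 0))) :=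
    foldl_range_stepA _ ans.length (0, 0, 0)
  rw [hb1, shared_eq ans a b ha hb]
  set bs := (a.zip (b.zip ans)).map (fun t => t.1 == t.2.1 && !(t.1 == t.2.2)) with hbs
  have h00 : ((0 : Int), (0 : Int), (0 : Int)) = ((0 : Int), ((0 : Nat) : Int), ((0 : Nat) : Int)) := rfl
  rw [h00, foldl_stepA bs 0 0 0]
  simp only []
  have hmax : (if ((gs 0 bs : Nat) : Int) > ((gl 0 0 bs : Nat) : Int)
      then ((gs 0 bs : Nat) : Int) else ((gl 0 0 bs : Nat) : Int)) = ((mrp 0 bs : Nat) : Int) := by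
    have h := max_gl_gs bs 0 0
    split_ifs <;> push_cast at * <;> omega
  rw [hmax]
  have hsum : (bs.map (fun x => if x then (1 : Int) else 0)).sum = (bs.countP (fun x => x) : Int) := by
    simpa using PySem.List.sum_map_ite_one_zero (fun x => x) bs
  have hlr : longestRun bs 0 = mrp 0 bs := by
    rw [longestRun_eq bs 0]; omega
  rw [hsum, hlr]
  push_cast
  ring

theorem if_gt_eq_max (r v : Int) : (if v > r then v else r) = max r v := by
  split_ifs <;> omega

theorem main_eq (ans : List Int) (sheets : List (List Int))
    (hpre : 2 ≤ sheets.length → ∀ s ∈ sheets, ans.length ≤ s.length) :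
    solution ans sheets = solution_alt ans sheets := by
  unfold solution solution_alt
  rw [PySem.List.enumerate_eq_map_pyRange sheets [], List.foldl_map]
  simp only [PySem.List.len_eq]
  rcases Nat.lt_or_ge sheets.length 2 with hL | hL
  · -- fewer than two sheets: A's outer range is empty, B's extra iteration is a no-op
    have e1 : PySem.List.pyRange 0 ((sheets.length : Int) - 1) = [] :=
      PySem.List.pyRange_one_eq_nil (by omega)
    rw [e1, List.foldl_nil]
    rcases Nat.lt_or_ge sheets.length 1 with h0 | h1
    · have e2 : PySem.List.pyRange 0 ((sheets.length : Int)) = [] :=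
        PySem.List.pyRange_one_eq_nil (by omega)
      rw [e2, List.foldl_nil]
    · have hlen : sheets.length = 1 := by omega
      have e3 : PySem.List.pyRange 0 ((sheets.length : Int)) = [0] := by
        have h : (sheets.length : Int) = 1 := by omega
        rw [h]; decide
      rw [e3, List.foldl_cons, List.foldl_nil]
      rw [PySem.List.slice_from sheets (by omega : (0 : Int) ≤ 0 + 1)]
      have e4 : ((0 : Int) + 1).toNat = 1 := by omega
      rw [e4]
      have e5 : sheets.drop 1 = [] := by
        apply List.drop_eq_nil_of_le; omega
      rw [e5, List.foldl_nil]
  · -- at least two sheets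
    have h2 := hpre hL
    have hsplit : PySem.List.pyRange 0 ((sheets.length : Int))
        = PySem.List.pyRange 0 ((sheets.length : Int) - 1) ++ [(sheets.length : Int) - 1] := by
      have h := PySem.List.pyRange_one_succ_right (a := 0) (b := (sheets.length : Int) - 1) (by omega)
      have hb : (sheets.length : Int) - 1 + 1 = (sheets.length : Int) := by ring
      rw [hb] at h
      exact h
    rw [hsplit, List.foldl_append, List.foldl_cons, List.foldl_nil]
    rw [PySem.List.slice_from sheets (by omega : (0 : Int) ≤ (sheets.length : Int) - 1 + 1)]
    have e6 : ((sheets.length : Int) - 1 + 1).toNat = sheets.length := by omega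
    rw [e6]
    have e7 : sheets.drop sheets.length = [] := by
      apply List.drop_eq_nil_of_le; omega
    rw [e7, List.foldl_nil]
    apply PySem.List.foldl_congr_mem
    intro acc i hi
    obtain ⟨hi0, hi1⟩ := PySem.List.mem_pyRange_one.mp hi
    show (PySem.List.pyRange (i + 1) ((sheets.length : Int)) 1).foldl (fun res j =>
        if innerA ans (PySem.List.pyGetD sheets i []) (PySem.List.pyGetD sheets j []) > res
        then innerA ans (PySem.List.pyGetD sheets i []) (PySem.List.pyGetD sheets j []) else res) acc
      = (PySem.List.slice sheets (some (i + 1)) none).foldl (fun best b =>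
          max best (pairVal ans (PySem.List.pyGetD sheets i []) b)) acc
    rw [PySem.List.slice_from sheets (by omega : (0 : Int) ≤ i + 1)]
    rw [PySem.List.foldl_pyRange_pyGetD' sheets []
      (fun res row => if innerA ans (PySem.List.pyGetD sheets i []) row > res
        then innerA ans (PySem.List.pyGetD sheets i []) row else res) acc
      (by omega : (0 : Int) ≤ i + 1)]
    apply PySem.List.foldl_congr_mem
    intro acc' row hrow
    have hrow' : row ∈ sheets := List.drop_subset _ _ hrow
    have hal : ans.length ≤ (PySem.List.pyGetD sheets i []).length := by
      rw [PySem.List.pyGetD_eq_getElem sheets [] hi0 (by omega)]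
      exact h2 _ (List.getElem_mem _)
    have hbl : ans.length ≤ row.length := h2 row hrow'
    rw [inner_eq ans _ row hal hbl, if_gt_eq_max]

-- ===== VERDICT (by name: the statement is the Claim_ definition above) =====
theorem solution_spec : Claim_equal_solution := by
  intro ans sheets _ hpre
  exact main_eq ans sheets hpre
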